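-- pv_equiv track=rewrite | github.com/rileyshahar/matchsticks | submonoids.py | print_nx1
-- ===== SOURCE A (Python) =====
-- def print_nx1(elements):
--     if not elements:
--         return "∅"
--     l = max(a for a, _ in elements)
--     s = [" " for _ in range (l * 2 + 1)]
--     s2 = [" " for _ in range (l * 2 + 1)]
--     for a, b in elements:
--         if b == 1:
--             s[a * 2] = "·"
--         else:
--             s2[a * 2] = "·"
--
--     return "".join(s) + "\n" + "".join(s2)
-- ===== SOURCE B (Python) =====
-- def print_nx1(elements):
--     if not elements:
--         return "∅"
--     row1 = {a for a, b in elements if b == 1}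
--     row2 = {a for a, b in elements if b != 1}
--     l = max(a for a, _ in elements)
--     line1 = "".join("·" if i % 2 == 0 and i // 2 in row1 else " " for i in range(l * 2 + 1))
--     line2 = "".join("·" if i % 2 == 0 and i // 2 in row2 else " " for i in range(l * 2 + 1))
--     return line1 + "\n" + line2
-- ===== Notes on version B (the rewrite author's own statement) =====
-- stated objective: idiomatic
-- what changed: Instead of scattering writes into two mutable position arrays while iterating over the elements, B first builds two sets of a-coordinates (b==1 vs b!=1) and then renders each line with a single comprehension over positions, deciding each cell by membership.
-- intended difference: On non-empty inputs containing a negative a-coordinate (where A does not raise), A's write s[a*2] wraps around via Python negative indexing and plants a dot at an odd, misaligned position, while B simply renders no dot for that element; B's output is the intended diagram since positions of the grid are 0..l. — e.g. on print_nx1([(-1, 1), (2, 2)]): A returns " · \n ·", B returns " \n ·"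
import Mathlib
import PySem

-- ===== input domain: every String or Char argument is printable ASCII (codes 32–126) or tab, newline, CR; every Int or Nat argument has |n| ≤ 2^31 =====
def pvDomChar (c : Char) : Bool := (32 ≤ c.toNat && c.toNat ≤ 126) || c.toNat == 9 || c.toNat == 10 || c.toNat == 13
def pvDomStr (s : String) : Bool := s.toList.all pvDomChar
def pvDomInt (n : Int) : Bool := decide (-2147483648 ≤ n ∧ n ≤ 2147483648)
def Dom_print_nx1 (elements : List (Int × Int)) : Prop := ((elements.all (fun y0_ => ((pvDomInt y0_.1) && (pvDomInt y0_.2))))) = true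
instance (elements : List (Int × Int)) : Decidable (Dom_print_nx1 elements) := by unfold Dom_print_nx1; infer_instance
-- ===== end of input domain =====

-- B renders each line by one comprehension over positions using two membership sets,
-- instead of A's scatter-writes into mutable arrays (objective: more idiomatic, same cost).

-- ===== PORT A =====
-- one pass of A's for-loop: write "·" at python index a*2 of row 1 (b == 1) or row 2
def pnStep (st : List String × List String) (p : Int × Int) : List String × List String :=
  if p.2 = 1 then (PySem.List.pySetD st.1 (p.1 * 2) "·", st.2)
  else (st.1, PySem.List.pySetD st.2 (p.1 * 2) "·")

def print_nx1 (elements : List (Int × Int)) : String :=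
  if elements = [] then "∅"
  else
    -- max(a for a, _ in elements); the getD default is unreachable (elements ≠ [])
    let l : Int := (PySem.List.max? (elements.map Prod.fst) (fun x => x)).getD 0
    let s : List String := (PySem.List.pyRange 0 (l * 2 + 1) 1).map (fun _ => " ")
    let s2 : List String := (PySem.List.pyRange 0 (l * 2 + 1) 1).map (fun _ => " ")
    let st := elements.foldl pnStep (s, s2)
    PySem.Str.join "" st.1 ++ "\n" ++ PySem.Str.join "" st.2

-- ===== PORT B =====
-- cell of a line at position i: "·" iff i is even and i // 2 is in the row's set
def pnCell (row : PySem.Set Int) (i : Int) : String :=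
  if PySem.Int.mod i 2 == 0 && PySem.Set.contains row (PySem.Int.floordiv i 2) then "·" else " "

def print_nx1_alt (elements : List (Int × Int)) : String :=
  if elements = [] then "∅"
  else
    let row1 : PySem.Set Int :=
      PySem.Set.ofList ((elements.filter (fun p => p.2 == 1)).map Prod.fst)
    let row2 : PySem.Set Int :=
      PySem.Set.ofList ((elements.filter (fun p => !(p.2 == 1))).map Prod.fst)
    -- max(a for a, _ in elements); the getD default is unreachable (elements ≠ [])
    let l : Int := (PySem.List.max? (elements.map Prod.fst) (fun x => x)).getD 0
    let line1 := PySem.Str.join "" ((PySem.List.pyRange 0 (l * 2 + 1) 1).map (pnCell row1))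
    let line2 := PySem.Str.join "" ((PySem.List.pyRange 0 (l * 2 + 1) 1).map (pnCell row2))
    line1 ++ "\n" ++ line2

-- ===== PRECONDITION & SPEC =====
-- Pre_ excludes exactly the inputs where A raises IndexError: a non-empty list containing
-- an a-coordinate a with a < -max(a's), whose wrapped write index falls outside the buffers.
def Pre_print_nx1 (elements : List (Int × Int)) : Prop :=
  ∀ p ∈ elements, ∃ q ∈ elements, 0 ≤ p.1 + q.1
instance (elements : List (Int × Int)) : Decidable (Pre_print_nx1 elements) := by
  unfold Pre_print_nx1; infer_instance
def pvWitness_print_nx1 : (List (Int × Int)) := [(0, 1), (1, 2)]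

-- On non-empty inputs with a negative a-coordinate (where A does not raise), A's write
-- s[a*2] wraps around via Python negative indexing and plants a dot at an odd, misaligned
-- position, while B renders no dot for that element; B's output is the intended diagram
-- since the grid positions are 0..l.
def D_print_nx1 (elements : List (Int × Int)) : Prop :=
  elements ≠ [] ∧ ∃ p ∈ elements, p.1 < 0
instance (elements : List (Int × Int)) : Decidable (D_print_nx1 elements) := by
  unfold D_print_nx1; infer_instance

def Spec_print_nx1 (elements : List (Int × Int)) (out : String) : Prop :=
  ¬ D_print_nx1 elements → out = print_nx1_alt elements
instance (elements : List (Int × Int)) (out : String) : Decidable (Spec_print_nx1 elements out) := by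
  unfold Spec_print_nx1; infer_instance

def pvDiffWitness_print_nx1 : (List (Int × Int)) := [(-1, 1), (2, 2)]
def pvDiffWitnessOut_print_nx1 : String × String := ("   · \n    ·", "     \n    ·")

-- ===== CLAIM (what is proved, stated in full; the proofs are below) =====
def Claim_unchanged_print_nx1 : Prop := ∀ (elements : List (Int × Int)), Dom_print_nx1 elements → Pre_print_nx1 elements → Spec_print_nx1 elements (print_nx1 elements)
def Claim_changed_print_nx1 : Prop := Dom_print_nx1 (pvDiffWitness_print_nx1) ∧ Pre_print_nx1 (pvDiffWitness_print_nx1) ∧ D_print_nx1 (pvDiffWitness_print_nx1) ∧ print_nx1 (pvDiffWitness_print_nx1) = pvDiffWitnessOut_print_nx1.1 ∧ print_nx1_alt (pvDiffWitness_print_nx1) = pvDiffWitnessOut_print_nx1.2 ∧ pvDiffWitnessOut_print_nx1.1 ≠ pvDiffWitnessOut_print_nx1.2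
-- ===== LEMMAS AND PROOFS =====

-- lengths of the row buffers are preserved by the fold
theorem pnFold_len (es : List (Int × Int)) (s s2 : List String) :
    (es.foldl pnStep (s, s2)).1.length = s.length ∧
    (es.foldl pnStep (s, s2)).2.length = s2.length := by
  induction es generalizing s s2 with
  | nil => exact ⟨rfl, rfl⟩
  | cons p t ih =>
    simp only [List.foldl_cons, pnStep]
    split_ifs
    · have := ih (PySem.List.pySetD s (p.1 * 2) "·") s2
      simpa [PySem.List.length_pySetD] using this
    · have := ih s (PySem.List.pySetD s2 (p.1 * 2) "·")
      simpa [PySem.List.length_pySetD] using this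

-- characterization of the row buffers after the fold, at any in-range position j,
-- assuming every write index of es is in range
theorem pnFold_get (es : List (Int × Int)) (s s2 : List String) (j : Nat)
    (hb : ∀ p ∈ es, 0 ≤ p.1 ∧ p.1 * 2 < (s.length : Int) ∧ p.1 * 2 < (s2.length : Int)) :
    (es.foldl pnStep (s, s2)).1[j]? =
      (if es.any (fun p => p.2 == 1 && p.1 * 2 == (j : Int)) then some "·" else s[j]?) ∧
    (es.foldl pnStep (s, s2)).2[j]? =
      (if es.any (fun p => !(p.2 == 1) && p.1 * 2 == (j : Int)) then some "·" else s2[j]?) := by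
  induction es generalizing s s2 with
  | nil => simp
  | cons p t ih =>
    obtain ⟨ha, h1, h2⟩ := hb p (List.mem_cons_self ..)
    have hb' : ∀ q ∈ t, 0 ≤ q.1 ∧ q.1 * 2 < (s.length : Int) ∧ q.1 * 2 < (s2.length : Int) :=
      fun q hq => hb q (List.mem_cons_of_mem _ hq)
    simp only [List.foldl_cons, pnStep]
    by_cases hp : p.2 = 1
    · simp only [if_pos hp]
      have := ih (PySem.List.pySetD s (p.1 * 2) "·") s2
        (by simpa [PySem.List.length_pySetD] using hb')
      rw [this.1, this.2]
      have hset : PySem.List.pySetD s (p.1 * 2) "·" = s.set (p.1 * 2).toNat "·" :=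
        PySem.List.pySetD_of_nonneg _ _ (by omega)
      constructor
      · by_cases ht : t.any (fun q => q.2 == 1 && q.1 * 2 == (j : Int))
        · simp [ht, hp]
        · simp only [ht, if_false, hset, List.any_cons, ht, Bool.or_false]
          by_cases hj : p.1 * 2 = (j : Int)
          · have hjn : (p.1 * 2).toNat = j := by omega
            have hjlt : j < s.length := by omega
            simp [hp, hj, hjn, List.getElem?_set, hjlt]
          · have hjn : (p.1 * 2).toNat ≠ j := by omega
            simp [hp, hj, List.getElem?_set, hjn]
      · by_cases ht : t.any (fun q => !(q.2 == 1) && q.1 * 2 == (j : Int)) <;>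
          simp [ht, hp]
    · simp only [if_neg hp]
      have := ih s (PySem.List.pySetD s2 (p.1 * 2) "·")
        (by simpa [PySem.List.length_pySetD] using hb')
      rw [this.1, this.2]
      have hset : PySem.List.pySetD s2 (p.1 * 2) "·" = s2.set (p.1 * 2).toNat "·" :=
        PySem.List.pySetD_of_nonneg _ _ (by omega)
      constructor
      · by_cases ht : t.any (fun q => q.2 == 1 && q.1 * 2 == (j : Int)) <;>
          simp [ht, hp]
      · by_cases ht : t.any (fun q => !(q.2 == 1) && q.1 * 2 == (j : Int))
        · simp [ht, hp]
        · simp only [ht, if_false, hset, List.any_cons, Bool.or_false]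
          by_cases hj : p.1 * 2 = (j : Int)
          · have hjn : (p.1 * 2).toNat = j := by omega
            have hjlt : j < s2.length := by omega
            simp [hp, hj, hjn, List.getElem?_set, hjlt]
          · have hjn : (p.1 * 2).toNat ≠ j := by omega
            simp [hp, hj, List.getElem?_set, hjn]

-- membership test of B at an even position agrees with A's "some element wrote here"
theorem pnAny_iff (es : List (Int × Int)) (c : Int → Bool) (j : Nat) :
    (es.any (fun p => c p.2 && p.1 * 2 == (j : Int))) =
      (PySem.Int.mod (j : Int) 2 == 0 &&
        PySem.Set.contains (PySem.Set.ofList ((es.filter (fun p => c p.2)).map Prod.fst))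
          (PySem.Int.floordiv (j : Int) 2)) := by
  have hmod : PySem.Int.mod (j : Int) 2 = (j : Int) % 2 :=
    PySem.Int.mod_eq_emod_of_pos (by omega)
  have hdiv : PySem.Int.floordiv (j : Int) 2 = (j : Int) / 2 :=
    PySem.Int.floordiv_eq_ediv_of_pos (by omega)
  rw [hmod, hdiv, Bool.eq_iff_iff]
  simp only [List.any_eq_true, Bool.and_eq_true, beq_iff_eq, PySem.Set.contains_iff,
    PySem.Set.mem_ofList, List.mem_map, List.mem_filter]
  constructor
  · rintro ⟨p, hp, hc, hj⟩
    exact ⟨by omega, ⟨p, ⟨hp, hc⟩, by omega⟩⟩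
  · rintro ⟨h0, p, ⟨hp, hc⟩, hj⟩
    exact ⟨p, hp, hc, by omega⟩

theorem pnLine_eq (es : List (Int × Int)) (l : Int) (c : Int → Bool)
    (hnn : ∀ p ∈ es, 0 ≤ p.1) (hle : ∀ p ∈ es, p.1 ≤ l) (hl : 0 ≤ l)
    (row : List String × List String)
    (hrow : row = es.foldl pnStep
      ((PySem.List.pyRange 0 (l * 2 + 1) 1).map (fun _ => " "),
       (PySem.List.pyRange 0 (l * 2 + 1) 1).map (fun _ => " ")))
    (pick : List String × List String → List String)
    (hpick : (pick = Prod.fst ∧ c = fun b => b == 1) ∨ (pick = Prod.snd ∧ c = fun b => !(b == 1))) :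
    pick row = (PySem.List.pyRange 0 (l * 2 + 1) 1).map
      (pnCell (PySem.Set.ofList ((es.filter (fun p => c p.2)).map Prod.fst))) := by
  set S := PySem.Set.ofList ((es.filter (fun p => c p.2)).map Prod.fst) with hS
  set s0 : List String := (PySem.List.pyRange 0 (l * 2 + 1) 1).map (fun _ => " ") with hs0
  have hn : (l * 2 + 1 : Int) = (((l * 2 + 1).toNat : Nat) : Int) := by omega
  have hlen0 : s0.length = (l * 2 + 1).toNat := by
    simp [hs0, PySem.List.length_pyRange_one]
  have hb : ∀ p ∈ es, 0 ≤ p.1 ∧ p.1 * 2 < (s0.length : Int) ∧ p.1 * 2 < (s0.length : Int) := by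
    intro p hp
    have h1 := hnn p hp
    have h2 := hle p hp
    refine ⟨h1, ?_, ?_⟩ <;> · rw [hlen0]; omega
  have hlenfold := pnFold_len es s0 s0
  have hlenpick : (pick row).length = s0.length := by
    rcases hpick with ⟨hp1, -⟩ | ⟨hp1, -⟩ <;> rw [hp1, hrow]
    · exact hlenfold.1
    · exact hlenfold.2
  apply List.ext_getElem?
  intro j
  by_cases hj : j < s0.length
  · have hget := pnFold_get es s0 s0 j hb
    have hrhs := PySem.List.getElem?_map_pyRange_zero (pnCell S) (l * 2 + 1).toNat j
      (by omega)
    rw [← hn] at hrhs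
    have hjr : j < (PySem.List.pyRange 0 (l * 2 + 1) 1).length := by
      rw [PySem.List.length_pyRange_one]; omega
    have hs0j : s0[j]? = some " " := by
      rw [hs0, List.getElem?_map, List.getElem?_eq_getElem hjr]; rfl
    have hcell : pnCell S (j : Int) =
        if es.any (fun p => c p.2 && p.1 * 2 == (j : Int)) then "·" else " " := by
      rw [pnCell, pnAny_iff es c j, hS]
    rcases hpick with ⟨hp1, hc⟩ | ⟨hp1, hc⟩ <;>
      rw [hp1, hrow, hrhs, hcell] <;>
      [rw [hget.1]; rw [hget.2]] <;>
      subst hc <;> split <;> simp [hs0j]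
  · have h1 : (pick row)[j]? = none := by
      rw [List.getElem?_eq_none_iff]; omega
    have h2 : ((PySem.List.pyRange 0 (l * 2 + 1) 1).map (pnCell S))[j]? = none := by
      rw [List.getElem?_eq_none_iff, List.length_map, PySem.List.length_pyRange_one]
      omega
    rw [h1, h2]

-- ===== VERDICT (by name: the statement is the Claim_ definition above) =====
theorem print_nx1_spec : Claim_unchanged_print_nx1 := by
  intro elements hdom hpre hnd
  by_cases hne : elements = []
  · subst hne; rfl
  · have hnn : ∀ p ∈ elements, 0 ≤ p.1 := by
      unfold D_print_nx1 at hnd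
      push_neg at hnd
      exact fun p hp => hnd hne p hp
    obtain ⟨p0, hp0⟩ := List.exists_mem_of_ne_nil elements hne
    obtain ⟨m, hm⟩ : ∃ m, PySem.List.max? (elements.map Prod.fst) (fun x => x) = some m := by
      rcases h : PySem.List.max? (elements.map Prod.fst) (fun x => x) with _ | m
      · rw [PySem.List.max?_eq_none_iff, List.map_eq_nil_iff] at h
        exact absurd h hne
      · exact ⟨m, rfl⟩
    have hle : ∀ p ∈ elements, p.1 ≤ m := fun p hp =>
      PySem.List.max?_isMax hm p.1 (List.mem_map_of_mem hp)
    have hl0 : 0 ≤ m := le_trans (hnn p0 hp0) (hle p0 hp0)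
    have h1 := pnLine_eq elements m (fun b => b == 1) hnn hle hl0 _ rfl Prod.fst
      (Or.inl ⟨rfl, rfl⟩)
    have h2 := pnLine_eq elements m (fun b => !(b == 1)) hnn hle hl0 _ rfl Prod.snd
      (Or.inr ⟨rfl, rfl⟩)
    simp only [print_nx1, print_nx1_alt, if_neg hne, hm, Option.getD_some]
    rw [show ∀ q : List String × List String, q.1 = Prod.fst q from fun _ => rfl,
      show ∀ q : List String × List String, q.2 = Prod.snd q from fun _ => rfl, h1, h2]

theorem print_nx1_changed : Claim_changed_print_nx1 := by
  unfold Claim_changed_print_nx1; decide
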